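-- pv_equiv track=rewrite | github.com/oneishaansharma/interviewPractice | Recursion/pairStar.py | pairStar
-- ===== SOURCE A (Python) =====
-- def pairStar(string,idx):
-- 	if(len(string)<2): return string
-- 	if idx==len(string)-1:
-- 		return string[idx]
-- 	else:
-- 		if string[idx] == string[idx+1]:
-- 			return string[idx] + "*" + pairStar(string,idx+1)
-- 		else:
-- 			return string[idx] + pairStar(string,idx+1)
-- ===== SOURCE B (Python) =====
-- def pairStar(string, idx):
--     if len(string) < 2:
--         return string
--     out = []
--     for i in range(idx, len(string)):
--         out.append(string[i])
--         if i < len(string) - 1 and string[i] == string[i + 1]: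
--             out.append("*")
--     return "".join(out)
-- ===== Notes on version B (the rewrite author's own statement) =====
-- stated objective: idiomatic
-- what changed: Replaces A's head recursion (one Python call frame per character) by a single iterative loop over range(idx, len(string)) that appends each character plus a '*' after equal adjacent pairs and joins once.
-- crash fix: On strings of length >= 2 with idx >= len(string), A raises IndexError (string[idx]) while B's loop is empty and returns ''. — e.g. on pairStar("ab", 2): A raises IndexError, B returns ""
import Mathlib
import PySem

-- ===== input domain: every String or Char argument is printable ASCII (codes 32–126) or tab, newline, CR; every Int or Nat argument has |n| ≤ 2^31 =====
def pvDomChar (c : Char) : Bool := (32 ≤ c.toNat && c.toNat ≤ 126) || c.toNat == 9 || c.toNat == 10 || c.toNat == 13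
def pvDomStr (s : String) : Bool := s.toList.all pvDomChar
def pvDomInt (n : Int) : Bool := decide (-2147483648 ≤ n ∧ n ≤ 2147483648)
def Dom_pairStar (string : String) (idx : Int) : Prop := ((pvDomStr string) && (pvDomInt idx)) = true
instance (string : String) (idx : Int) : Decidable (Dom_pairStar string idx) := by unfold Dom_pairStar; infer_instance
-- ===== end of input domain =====

-- B replaces A's recursion by the idiomatic single loop over range(idx, len(string))
-- appending each character and a '*' after each equal adjacent pair ("alternative").

-- ===== PORT A =====
-- recursion of A on the character list, driven by a sufficient Nat fuel (idx increases by 1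
-- toward len-1, so (len - idx).toNat + 1 steps always suffice); pyGet? none = Python's
-- IndexError (excluded by Pre_)
def pairStarAuxA (cs : List Char) (fuel : Nat) (idx : Int) : List Char :=
  match fuel with
  | 0 => []
  | k + 1 =>
    match PySem.List.pyGet? cs idx with
    | none => []      -- A raises IndexError here (outside Pre_)
    | some c =>
      if idx = (cs.length : Int) - 1 then [c]
      else
        match PySem.List.pyGet? cs (idx + 1) with
        | none => []  -- A raises IndexError here (outside Pre_)
        | some d =>
          if c = d then c :: '*' :: pairStarAuxA cs k (idx + 1)
          else c :: pairStarAuxA cs k (idx + 1)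

def pairStar (string : String) (idx : Int) : String :=
  if PySem.Str.len string < 2 then string
  else String.ofList
    (pairStarAuxA string.toList (((string.toList.length : Int) - idx).toNat + 1) idx)

-- ===== PORT B =====
-- the loop body of B: append string[i], then '*' when i < len-1 and string[i] == string[i+1]
def pairStarStep (cs : List Char) (acc : List Char) (i : Int) : List Char :=
  let acc := acc ++ (match PySem.List.pyGet? cs i with
                     | none => []   -- B raises IndexError here (outside Pre_)
                     | some c => [c])
  if i < (cs.length : Int) - 1 then
    if PySem.List.pyGet? cs i = PySem.List.pyGet? cs (i + 1) then acc ++ ['*'] else acc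
  else acc

def pairStar_alt (string : String) (idx : Int) : String :=
  if PySem.Str.len string < 2 then string
  else
    String.ofList
      ((PySem.List.pyRange idx (PySem.Str.len string)).foldl (pairStarStep string.toList) [])

-- ===== PRECONDITION & SPEC =====
-- Pre_ excludes exactly the inputs on which A raises IndexError: len(string) ≥ 2 with idx
-- outside the valid (negative-index included) range [-len, len).
def Pre_pairStar (string : String) (idx : Int) : Prop :=
  PySem.Str.len string < 2 ∨ (-(PySem.Str.len string) ≤ idx ∧ idx < PySem.Str.len string)
instance (string : String) (idx : Int) : Decidable (Pre_pairStar string idx) := by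
  unfold Pre_pairStar; infer_instance

def pvWitness_pairStar : String × Int := ("aabcc", 0)

-- On strings of length ≥ 2 with idx ≥ len(string), A raises IndexError while B returns "".
def Raises_pairStar (string : String) (idx : Int) : Prop :=
  2 ≤ PySem.Str.len string ∧ PySem.Str.len string ≤ idx
instance (string : String) (idx : Int) : Decidable (Raises_pairStar string idx) := by
  unfold Raises_pairStar; infer_instance
def pvRaiseWitness_pairStar : String × Int := ("ab", 2)
def pvRaiseWitnessOut_pairStar : String := ""

def Spec_pairStar (string : String) (idx : Int) (out : String) : Prop := out = pairStar_alt string idx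
instance (string : String) (idx : Int) (out : String) : Decidable (Spec_pairStar string idx out) := by unfold Spec_pairStar; infer_instance

-- ===== CLAIM (what is proved, stated in full; the proofs are below) =====
def Claim_equal_pairStar : Prop := ∀ (string : String) (idx : Int), Dom_pairStar string idx → Pre_pairStar string idx → Spec_pairStar string idx (pairStar string idx)

def Claim_raises_pairStar : Prop :=
  (∀ (string : String) (idx : Int), Dom_pairStar string idx → Raises_pairStar string idx → ¬ Pre_pairStar string idx) ∧
  (Dom_pairStar (pvRaiseWitness_pairStar.1) (pvRaiseWitness_pairStar.2) ∧
   Raises_pairStar (pvRaiseWitness_pairStar.1) (pvRaiseWitness_pairStar.2) ∧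
   pairStar_alt (pvRaiseWitness_pairStar.1) (pvRaiseWitness_pairStar.2) = pvRaiseWitnessOut_pairStar)

-- ===== LEMMAS AND PROOFS =====

lemma pyGet?_isSome_of_inRange {cs : List Char} {i : Int}
    (h1 : -(cs.length : Int) ≤ i) (h2 : i < (cs.length : Int)) :
    ∃ c, PySem.List.pyGet? cs i = some c := by
  cases hg : PySem.List.pyGet? cs i with
  | some c => exact ⟨c, rfl⟩
  | none =>
    rw [PySem.List.pyGet?_eq_none_iff] at hg
    exact absurd (by simp [PySem.Raise.InRange]; omega) hg

-- B's fold from any accumulator equals the accumulator followed by A's recursion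
lemma fold_eq_aux (cs : List Char) :
    ∀ (fuel : Nat) (idx : Int) (acc : List Char),
      -(cs.length : Int) ≤ idx → idx < (cs.length : Int) →
      ((cs.length : Int) - 1 - idx).toNat < fuel →
      (PySem.List.pyRange idx (cs.length : Int)).foldl (pairStarStep cs) acc
        = acc ++ pairStarAuxA cs fuel idx := by
  intro fuel
  induction fuel with
  | zero => intro idx acc _ _ hf; omega
  | succ k ih =>
    intro idx acc hlo hhi _
    obtain ⟨c, hc⟩ := pyGet?_isSome_of_inRange hlo hhi
    rw [PySem.List.pyRange_one_cons hhi]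
    simp only [List.foldl_cons]
    by_cases hlast : idx = (cs.length : Int) - 1
    · have : (cs.length : Int) ≤ idx + 1 := by omega
      rw [PySem.List.pyRange_one_eq_nil this]
      simp only [List.foldl_nil]
      unfold pairStarStep pairStarAuxA
      rw [hc]
      simp [hlast]
    · have hhi' : idx + 1 < (cs.length : Int) := by omega
      obtain ⟨d, hd⟩ := pyGet?_isSome_of_inRange (by omega) hhi'
      have step : pairStarStep cs acc idx
          = acc ++ (if c = d then [c, '*'] else [c]) := by
        unfold pairStarStep
        rw [hc, hd]
        have : idx < (cs.length : Int) - 1 := by omega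
        simp only [this, if_true]
        by_cases hcd : c = d <;> simp [hcd]
      rw [step, ih (idx + 1) _ (by omega) hhi' (by omega)]
      conv_rhs => rw [pairStarAuxA]
      rw [hc, hd]
      simp only [hlast, if_false]
      by_cases hcd : c = d <;> simp [hcd]

-- ===== VERDICT (by name: the statement is the Claim_ definition above) =====
theorem pairStar_spec : Claim_equal_pairStar := by
  intro string idx _ hpre
  unfold Spec_pairStar pairStar pairStar_alt
  split_ifs with hs
  · rfl
  · rcases hpre with h | ⟨hlo, hhi⟩
    · exact absurd h hs
    · rw [PySem.Str.len_eq] at hlo hhi ⊢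
      rw [fold_eq_aux string.toList (((string.toList.length : Int) - idx).toNat + 1) idx []
            hlo hhi (by omega)]
      simp

theorem pairStar_raises : Claim_raises_pairStar := by
  unfold Claim_raises_pairStar
  constructor
  · intro s i _ hr
    unfold Raises_pairStar at hr
    unfold Pre_pairStar
    omega
  · refine ⟨by decide, by unfold Raises_pairStar; decide, by decide⟩

-- self-check: the raises-witness value of B, read back off the theorem
theorem pairStar_raises_ok :
    pairStar_alt pvRaiseWitness_pairStar.1 pvRaiseWitness_pairStar.2 = pvRaiseWitnessOut_pairStar :=
  pairStar_raises.2.2.2
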